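-- pv_equiv track=rewrite | github.com/SeventhBlue/chinese_ocr | ocr.py | getFontSize
-- ===== SOURCE A (Python) =====
-- def getFontSize(h):
--     """
--     通过矩形的高大概获得字体的字号
--     :param h:
--     :return:
--     """
--     fontSize2h = {}
--     fontSize2h[10] = [1, 9]
--     fontSize2h[14] = [10, 17]
--     fontSize2h[16] = [18, 26]
--     fontSize2h[17] = [27, 30]
--     fontSize2h[20] = [31, 35]
--     fontSize2h[22] = [36, 40]
--     fontSize2h[24] = [41, 45]
--     fontSize2h[26] = [46, 48]
--     fontSize2h[30] = [49, 50]
--     fontSize2h[31] = [51, 55]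
--
--     for key in fontSize2h:
--         if fontSize2h[key][0] <= h <= fontSize2h[key][1]:
--             return key
--     return 32
-- ===== SOURCE B (Python) =====
-- def getFontSize(h):
--     """
--     通过矩形的高大概获得字体的字号
--     :param h:
--     :return:
--     """
--     uppers = [9, 17, 26, 30, 35, 40, 45, 48, 50, 55]
--     sizes = [10, 14, 16, 17, 20, 22, 24, 26, 30, 31]
--     if h < 1:
--         return 32
--     # hand-rolled bisect_left (A imports nothing, so no bisect module)
--     lo, hi = 0, len(uppers)
--     while lo < hi:
--         mid = (lo + hi) // 2
--         if uppers[mid] < h: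
--             lo = mid + 1
--         else:
--             hi = mid
--     return sizes[lo] if lo < len(sizes) else 32
-- ===== Notes on version B (the rewrite author's own statement) =====
-- stated objective: idiomatic
-- what changed: Replaces the dict of [lo,hi] ranges and the linear scan over all ten buckets with two parallel sorted arrays of upper bounds and sizes plus a hand-rolled bisect_left binary search.
import Mathlib
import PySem

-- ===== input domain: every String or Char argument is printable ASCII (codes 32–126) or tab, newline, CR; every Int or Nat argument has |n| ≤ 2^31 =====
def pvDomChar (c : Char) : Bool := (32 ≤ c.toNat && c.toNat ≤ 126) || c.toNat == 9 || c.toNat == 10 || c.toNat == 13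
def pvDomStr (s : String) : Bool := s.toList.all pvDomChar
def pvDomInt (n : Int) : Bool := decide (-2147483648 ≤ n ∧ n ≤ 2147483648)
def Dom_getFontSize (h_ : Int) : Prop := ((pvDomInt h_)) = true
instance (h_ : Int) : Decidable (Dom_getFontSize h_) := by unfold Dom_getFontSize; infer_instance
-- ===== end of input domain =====

-- B replaces A's dict-of-ranges linear scan with a binary search (bisect_left) over two
-- parallel sorted arrays of upper bounds and sizes; same return value for every int h.

-- ===== PORT A =====
-- A-side helper: the for-loop with early return
def pvScanA (h_ : Int) : List (Int × Int × Int) → Int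
  | [] => 32
  | (k, lo, hi) :: rest => if lo ≤ h_ ∧ h_ ≤ hi then k else pvScanA h_ rest

def getFontSize (h_ : Int) : Int :=
  -- the dict fontSize2h in insertion order: (key, [lo, hi])
  let fontSize2h : List (Int × Int × Int) :=
    [(10, 1, 9), (14, 10, 17), (16, 18, 26), (17, 27, 30), (20, 31, 35),
     (22, 36, 40), (24, 41, 45), (26, 46, 48), (30, 49, 50), (31, 51, 55)]
  -- 'for key in fontSize2h: if lo <= h <= hi: return key' then 'return 32'
  pvScanA h_ fontSize2h

-- ===== PORT B =====
-- B-side helper: bisect_left's while-loop, fuel = list length (loop halves [lo,hi) each step)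
def pvBisectLeft (xs : List Int) (x : Int) : Nat → Nat → Nat → Nat
  | 0, lo, _ => lo
  | fuel + 1, lo, hi =>
    if lo < hi then
      let mid := (lo + hi) / 2
      if xs.getD mid 0 < x then pvBisectLeft xs x fuel (mid + 1) hi
      else pvBisectLeft xs x fuel lo mid
    else lo

def getFontSize_alt (h_ : Int) : Int :=
  let uppers : List Int := [9, 17, 26, 30, 35, 40, 45, 48, 50, 55]
  let sizes : List Int := [10, 14, 16, 17, 20, 22, 24, 26, 30, 31]
  if h_ < 1 then 32
  else
    let lo := pvBisectLeft uppers h_ uppers.length 0 uppers.length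
    if lo < sizes.length then sizes.getD lo 32 else 32

-- ===== PRECONDITION & SPEC =====
def Spec_getFontSize (h_ : Int) (out : Int) : Prop := out = getFontSize_alt h_
instance (h_ : Int) (out : Int) : Decidable (Spec_getFontSize h_ out) := by unfold Spec_getFontSize; infer_instance

-- ===== CLAIM (what is proved, stated in full; the proofs are below) =====
def Claim_equal_getFontSize : Prop := ∀ (h_ : Int), Dom_getFontSize h_ → Spec_getFontSize h_ (getFontSize h_)

-- ===== LEMMAS AND PROOFS =====

-- ===== VERDICT (by name: the statement is the Claim_ definition above) =====
set_option maxHeartbeats 1000000 in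
theorem getFontSize_spec : Claim_equal_getFontSize := by
  intro h _
  unfold Spec_getFontSize getFontSize getFontSize_alt
  simp only [pvScanA, pvBisectLeft, List.getD, List.length_cons, List.length_nil,
    List.getElem?_cons_zero, List.getElem?_cons_succ, Option.getD_some,
    Nat.reduceAdd, Nat.reduceDiv, Nat.reduceLT, reduceIte]
  split_ifs <;> first
    | omega
    | (simp_all only [List.getElem?_cons_zero, List.getElem?_cons_succ, Option.getD_some,
        not_and, not_lt, not_le]; try omega)
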